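-- pv_equiv track=rewrite | github.com/rajashekarbumandla/academic-drift-detector | rules.py | analyze_subjects
-- ===== SOURCE A (Python) =====
-- def analyze_subjects(marks):
--     strong, weak = [], []
--     heatmap = {}
--
--     for subject, score in marks.items():
--         score = int(score)
--
--         if score >= 75:
--             strong.append(subject)
--             heatmap[subject] = "green"
--         elif score >= 40:
--             heatmap[subject] = "yellow"
--         else:
--             weak.append(subject)
--             heatmap[subject] = "red"
--
--     return strong, weak, heatmap
-- ===== SOURCE B (Python) =====
-- def analyze_subjects(marks):
--     # Divide-and-conquer: split the items in half, solve each half, merge by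
--     # concatenating the strong/weak lists and the heatmaps (order preserved).
--     def solve(items):
--         if not items:
--             return [], [], {}
--         if len(items) == 1:
--             subject, score = items[0]
--             score = int(score)
--             color = "green" if score >= 75 else ("yellow" if score >= 40 else "red")
--             return ([subject] if color == "green" else [],
--                     [subject] if color == "red" else [],
--                     {subject: color})
--         mid = len(items) // 2
--         s1, w1, h1 = solve(items[:mid])
--         s2, w2, h2 = solve(items[mid:])
--         return s1 + s2, w1 + w2, {**h1, **h2}
--     return solve(list(marks.items()))
-- ===== Notes on version B (the rewrite author's own statement) =====
-- stated objective: alternative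
-- what changed: Replaces A's single left-to-right fused loop with a divide-and-conquer recursion: the item list is split in halves, each half solved recursively (base case classifies one subject), and results merged by list/dict concatenation.
import Mathlib
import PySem

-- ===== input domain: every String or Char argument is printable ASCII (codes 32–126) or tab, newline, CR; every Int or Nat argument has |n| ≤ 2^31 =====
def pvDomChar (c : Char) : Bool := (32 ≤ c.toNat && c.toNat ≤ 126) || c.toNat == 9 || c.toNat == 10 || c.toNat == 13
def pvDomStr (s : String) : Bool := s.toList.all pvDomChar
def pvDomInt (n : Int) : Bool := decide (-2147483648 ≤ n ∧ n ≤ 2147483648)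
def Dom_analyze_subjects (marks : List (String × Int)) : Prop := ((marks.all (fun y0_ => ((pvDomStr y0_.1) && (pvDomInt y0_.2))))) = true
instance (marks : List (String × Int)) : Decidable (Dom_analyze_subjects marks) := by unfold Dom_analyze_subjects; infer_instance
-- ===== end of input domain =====

-- B replaces A's fused left-to-right classify loop by a divide-and-conquer recursion
-- (split in halves, solve each, merge by concatenation) — alternative decomposition.


-- ===== PORT A =====
-- for subject, score: classify into strong/weak lists and the heatmap dict in one loop
def analyze_subjects (marks : List (String × Int)) : List String × List String × (List (String × String)) :=
  let r := marks.foldl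
    (fun (acc : List String × List String × PySem.Dict String String) p =>
      let subject := p.1
      let score := p.2          -- int(score) is the identity on Int
      if score ≥ 75 then (acc.1 ++ [subject], acc.2.1, acc.2.2.insert subject "green")
      else if score ≥ 40 then (acc.1, acc.2.1, acc.2.2.insert subject "yellow")
      else (acc.1, acc.2.1 ++ [subject], acc.2.2.insert subject "red"))
    (([] : List String), ([] : List String), (PySem.Dict.empty : PySem.Dict String String))
  (r.1, r.2.1, r.2.2.items)

-- ===== PORT B =====
-- solve(items): divide and conquer over the item list.
-- items[:mid] / items[mid:] with 0 ≤ mid ≤ len are exactly take/drop.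
-- {**h1, **h2} is h1 updated with h2's items in order.
def solveB : List (String × Int) → List String × List String × PySem.Dict String String
  | [] => ([], [], (PySem.Dict.empty : PySem.Dict String String))
  | [(subject, score)] =>
    let color := if score ≥ 75 then "green" else if score ≥ 40 then "yellow" else "red"
    ((if color == "green" then [subject] else []),
     (if color == "red" then [subject] else []),
     (PySem.Dict.empty : PySem.Dict String String).insert subject color)
  | a :: b :: rest =>
    let l := a :: b :: rest
    let mid := l.length / 2
    let r1 := solveB (l.take mid)
    let r2 := solveB (l.drop mid)
    (r1.1 ++ r2.1, r1.2.1 ++ r2.2.1,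
     r2.2.2.items.foldl (fun (d : PySem.Dict String String) p => d.insert p.1 p.2) r1.2.2)
termination_by l => l.length
decreasing_by
  · simp only [List.length_take, List.length_cons]; omega
  · simp only [List.length_drop, List.length_cons]; omega

def analyze_subjects_alt (marks : List (String × Int)) : List String × List String × (List (String × String)) :=
  let r := solveB marks
  (r.1, r.2.1, r.2.2.items)

-- ===== PRECONDITION & SPEC =====
-- A's parameter is a Python dict; an association list with duplicate keys does not
-- represent any dict input of A, so Pre_ requires the keys to be distinct.
def Pre_analyze_subjects (marks : List (String × Int)) : Prop :=
  (marks.map Prod.fst).Nodup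
instance (marks : List (String × Int)) : Decidable (Pre_analyze_subjects marks) := by unfold Pre_analyze_subjects; infer_instance
def pvWitness_analyze_subjects : (List (String × Int)) := [("math", 80), ("art", 50), ("gym", 10)]

def Spec_analyze_subjects (marks : List (String × Int)) (out : List String × List String × (List (String × String))) : Prop := out = analyze_subjects_alt marks
instance (marks : List (String × Int)) (out : List String × List String × (List (String × String))) : Decidable (Spec_analyze_subjects marks out) := by unfold Spec_analyze_subjects; infer_instance

-- ===== CLAIM (what is proved, stated in full; the proofs are below) =====
def Claim_equal_analyze_subjects : Prop := ∀ (marks : List (String × Int)), Dom_analyze_subjects marks → Pre_analyze_subjects marks → Spec_analyze_subjects marks (analyze_subjects marks)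

-- ===== LEMMAS AND PROOFS =====

def pvColor (score : Int) : String :=
  if score ≥ 75 then "green" else if score ≥ 40 then "yellow" else "red"

-- the common characterisation both programs compute
def pvRes (l : List (String × Int)) : List String × List String × PySem.Dict String String :=
  ((l.filter (fun p => decide (p.2 ≥ 75))).map Prod.fst,
   (l.filter (fun p => decide (p.2 < 40))).map Prod.fst,
   PySem.Dict.mk (l.map (fun p => (p.1, pvColor p.2))))

-- A's loop, characterised for a fresh-keyed suffix and arbitrary accumulator.
theorem analyze_loopA (l : List (String × Int)) (s w : List String)
    (d : PySem.Dict String String)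
    (hf : ∀ p ∈ l, d.contains p.1 = false) (hnd : (l.map Prod.fst).Nodup) :
    l.foldl
      (fun (acc : List String × List String × PySem.Dict String String) p =>
        if p.2 ≥ 75 then (acc.1 ++ [p.1], acc.2.1, acc.2.2.insert p.1 "green")
        else if p.2 ≥ 40 then (acc.1, acc.2.1, acc.2.2.insert p.1 "yellow")
        else (acc.1, acc.2.1 ++ [p.1], acc.2.2.insert p.1 "red")) (s, w, d)
    = (s ++ (pvRes l).1, w ++ (pvRes l).2.1,
       PySem.Dict.mk (d.items ++ (pvRes l).2.2.items)) := by
  induction l generalizing s w d with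
  | nil => simp [pvRes]
  | cons p l ih =>
    have hpc : d.contains p.1 = false := hf p (List.mem_cons_self)
    have hins : ∀ v, (d.insert p.1 v).items = d.items ++ [(p.1, v)] :=
      fun v => PySem.Dict.items_insert_of_not_contains _ v hpc
    have hnd' : (l.map Prod.fst).Nodup := (List.nodup_cons.mp hnd).2
    have hf' : ∀ v, ∀ q ∈ l, (d.insert p.1 v).contains q.1 = false := by
      intro v q hq
      rw [PySem.Dict.contains_insert]
      have hne : q.1 ≠ p.1 := by
        intro h
        exact (List.nodup_cons.mp hnd).1 (h ▸ List.mem_map_of_mem hq)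
      simp [hne, hf q (List.mem_cons_of_mem _ hq)]
    simp only [List.foldl_cons]
    by_cases h75 : p.2 ≥ 75
    · rw [if_pos h75, ih _ _ _ (hf' _) hnd']
      have : ¬ p.2 < 40 := by omega
      simp [hins, pvRes, pvColor, h75, this]
    · rw [if_neg h75]
      by_cases h40 : p.2 ≥ 40
      · rw [if_pos h40, ih _ _ _ (hf' _) hnd']
        have : ¬ p.2 < 40 := by omega
        simp [hins, pvRes, pvColor, h75, h40, this]
      · rw [if_neg h40, ih _ _ _ (hf' _) hnd']
        have : p.2 < 40 := by omega
        simp [hins, pvRes, pvColor, h75, h40, this]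

theorem pvRes_append (l1 l2 : List (String × Int))
    (hdisj : ∀ k ∈ l2.map Prod.fst, k ∉ l1.map Prod.fst)
    (hnd2 : (l2.map Prod.fst).Nodup) :
    pvRes (l1 ++ l2) =
      ((pvRes l1).1 ++ (pvRes l2).1, (pvRes l1).2.1 ++ (pvRes l2).2.1,
       (pvRes l2).2.2.items.foldl
         (fun (d : PySem.Dict String String) p => d.insert p.1 p.2) (pvRes l1).2.2) := by
  have hfold :
      ((pvRes l2).2.2.items.foldl
        (fun (d : PySem.Dict String String) p => d.insert p.1 p.2) (pvRes l1).2.2)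
      = PySem.Dict.mk ((l1 ++ l2).map (fun p => (p.1, pvColor p.2))) := by
    have hitems2 : (pvRes l2).2.2.items = l2.map (fun p => (p.1, pvColor p.2)) := rfl
    apply PySem.Dict.ext
    rw [hitems2, PySem.Dict.items_foldl_insert_fresh _ Prod.fst Prod.snd _ ?hfresh ?hnd]
    · simp [pvRes]
    case hfresh =>
      intro q hq
      simp only [List.mem_map] at hq
      obtain ⟨p, hp, rfl⟩ := hq
      have : p.1 ∉ l1.map Prod.fst := hdisj p.1 (List.mem_map_of_mem hp)
      simp only [pvRes, PySem.Dict.contains_mk]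
      rw [List.any_eq_false]
      rintro q hq
      simp only [List.mem_map] at hq
      obtain ⟨r, hr, rfl⟩ := hq
      simp only [beq_iff_eq]
      intro h
      exact this (h ▸ List.mem_map_of_mem hr)
    case hnd =>
      simpa [List.map_map, Function.comp_def] using hnd2
  rw [hfold]
  simp [pvRes, List.filter_append]

-- B's recursion computes pvRes under distinct keys.
theorem solveB_eq (l : List (String × Int)) (hnd : (l.map Prod.fst).Nodup) :
    solveB l = pvRes l := by
  induction hn : l.length using Nat.strong_induction_on generalizing l with
  | _ n ih =>
  match l with
  | [] => simp [solveB, pvRes, PySem.Dict.empty]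
  | [(subject, score)] =>
    simp only [solveB, pvRes]
    by_cases h75 : score ≥ 75
    · have : ¬ score < 40 := by omega
      simp [pvColor, h75, this, PySem.Dict.ext_iff,
        PySem.Dict.items_insert_of_not_contains, PySem.Dict.empty]
    · by_cases h40 : score ≥ 40
      · have : ¬ score < 40 := by omega
        simp [pvColor, h75, h40, this, PySem.Dict.ext_iff,
          PySem.Dict.items_insert_of_not_contains, PySem.Dict.empty]
      · have : score < 40 := by omega
        simp [pvColor, h75, h40, this, PySem.Dict.ext_iff,
          PySem.Dict.items_insert_of_not_contains, PySem.Dict.empty]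
  | a :: b :: rest =>
    have hlen : (a :: b :: rest).length = n := hn
    set L : List (String × Int) := a :: b :: rest with hL
    have hmid1 : 1 ≤ L.length / 2 := by simp [hL]; omega
    have hmidlt : L.length / 2 < L.length := by simp [hL]; omega
    have hsplit : L.take (L.length / 2) ++ L.drop (L.length / 2) = L :=
      List.take_append_drop _ _
    have hndt : ((L.take (L.length / 2)).map Prod.fst).Nodup := by
      have := hnd; rw [← hsplit, List.map_append, List.nodup_append] at this
      exact this.1
    have hndd : ((L.drop (L.length / 2)).map Prod.fst).Nodup := by
      have := hnd; rw [← hsplit, List.map_append, List.nodup_append] at this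
      exact this.2.1
    have hdisj : ∀ k ∈ (L.drop (L.length / 2)).map Prod.fst,
        k ∉ (L.take (L.length / 2)).map Prod.fst := by
      have := hnd; rw [← hsplit, List.map_append, List.nodup_append] at this
      intro k hk hk'
      exact this.2.2 k hk' k hk rfl
    have h1 : solveB (L.take (L.length / 2)) = pvRes (L.take (L.length / 2)) := by
      apply ih (L.take (L.length / 2)).length _ _ hndt rfl
      simp only [List.length_take]
      omega
    have h2 : solveB (L.drop (L.length / 2)) = pvRes (L.drop (L.length / 2)) := by
      apply ih (L.drop (L.length / 2)).length _ _ hndd rfl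
      simp only [List.length_drop]
      omega
    calc solveB L
        = ((solveB (L.take (L.length / 2))).1 ++ (solveB (L.drop (L.length / 2))).1,
           (solveB (L.take (L.length / 2))).2.1 ++ (solveB (L.drop (L.length / 2))).2.1,
           (solveB (L.drop (L.length / 2))).2.2.items.foldl
             (fun (d : PySem.Dict String String) p => d.insert p.1 p.2)
             (solveB (L.take (L.length / 2))).2.2) := by
          conv_lhs => rw [hL, solveB]
      _ = pvRes L := by
          rw [h1, h2, ← pvRes_append _ _ hdisj hndd, hsplit]

-- ===== VERDICT (by name: the statement is the Claim_ definition above) =====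
theorem analyze_subjects_spec : Claim_equal_analyze_subjects := by
  intro marks _ hpre
  unfold Spec_analyze_subjects analyze_subjects analyze_subjects_alt
  rw [solveB_eq marks hpre]
  have hA := analyze_loopA marks [] [] PySem.Dict.empty (by simp) hpre
  simp only [hA]
  simp [PySem.Dict.empty]
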